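-- pv_equiv track=rewrite | github.com/zendev-ady/sportovni-eshop-new-products | src/product_grouper.py | _merge_images
-- ===== SOURCE A (Python) =====
-- from typing import Dict, List, Literal, Optional
--
-- def _merge_images(products: List[Dict]) -> List[str]:
--     """
--     Merge image URL lists from all products in the group, preserving order
--     and deduplicating by URL.
--
--     Args:
--         products: list of parsed product dicts for one model group.
--
--     Returns:
--         Deduplicated list of absolute image URLs.
--     """
--     seen: set = set()
--     result: List[str] = []
--     for p in products:
--         for url in p["images"]:
--             if url not in seen:
--                 seen.add(url)
--                 result.append(url)
--     return result
-- ===== SOURCE B (Python) =====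
-- from typing import Dict, List
--
--
-- def _merge_images(products: List[Dict]) -> List[str]:
--     """Two staged passes: first concatenate every product's image list into one
--     flat list, then keep each URL only at the position of its first occurrence
--     (flat.index(u) == i), which deduplicates without any auxiliary seen set."""
--     flat: List[str] = []
--     for p in products:
--         flat.extend(p["images"])
--     return [u for i, u in enumerate(flat) if flat.index(u) == i]
-- ===== Notes on version B (the rewrite author's own statement) =====
-- stated objective: alternative
-- what changed: Replaces the single interleaved loop with a seen set by two staged passes: first flatten all image lists into one list, then keep each URL only where flat.index(u) equals its position, trading the auxiliary set for an index-based first-occurrence filter.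
import Mathlib
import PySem

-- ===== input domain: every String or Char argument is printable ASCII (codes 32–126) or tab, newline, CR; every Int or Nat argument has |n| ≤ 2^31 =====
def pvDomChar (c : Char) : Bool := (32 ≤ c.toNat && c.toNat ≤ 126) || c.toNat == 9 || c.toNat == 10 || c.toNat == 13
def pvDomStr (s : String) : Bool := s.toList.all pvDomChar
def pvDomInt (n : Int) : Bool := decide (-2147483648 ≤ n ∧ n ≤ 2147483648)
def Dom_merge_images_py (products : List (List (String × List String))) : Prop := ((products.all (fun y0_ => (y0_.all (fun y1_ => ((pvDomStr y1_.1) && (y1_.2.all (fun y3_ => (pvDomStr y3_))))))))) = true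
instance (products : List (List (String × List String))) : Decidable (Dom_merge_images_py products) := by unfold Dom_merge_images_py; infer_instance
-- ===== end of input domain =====

-- B replaces A's interleaved seen-set loop with two staged passes: flatten all image
-- lists, then keep each URL only at the position of its first occurrence (index-based
-- filter, no auxiliary set); return values agree wherever A returns.

-- ===== PORT A =====
-- seen: set / result: list, nested loop, 'if url not in seen: seen.add(url); result.append(url)'
def merge_images_py (products : List (List (String × List String))) : List String :=
  (products.foldl
    (fun (st : PySem.Set String × List String) p =>
      ((PySem.Dict.mk p).getD "images" []).foldl
        (fun st url =>
          if st.1.contains url then st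
          else (PySem.Set.add st.1 url, st.2 ++ [url]))
        st)
    (PySem.Set.empty, [])).2

-- ===== PORT B =====
-- flat = []; for p: flat.extend(p["images"]); [u for i, u in enumerate(flat) if flat.index(u) == i]
def merge_images_py_alt (products : List (List (String × List String))) : List String :=
  let flat := products.foldl (fun acc p => acc ++ (PySem.Dict.mk p).getD "images" []) []
  ((PySem.List.enumerate flat).filter
      (fun iu => PySem.List.index? flat iu.2 == some iu.1.toNat)).map (fun iu => iu.2)

-- ===== PRECONDITION & SPEC =====
-- A (and B alike) raises KeyError when a product dict lacks the "images" key; Pre_ excludes exactly those inputs.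
def Pre_merge_images_py (products : List (List (String × List String))) : Prop :=
  (products.all (fun p => (PySem.Dict.mk p).contains "images")) = true
instance (products : List (List (String × List String))) : Decidable (Pre_merge_images_py products) := by unfold Pre_merge_images_py; infer_instance
def pvWitness_merge_images_py : (List (List (String × List String))) :=
  [[("images", ["a.jpg", "b.jpg"])], [("images", ["b.jpg", "c.jpg"])]]
def Spec_merge_images_py (products : List (List (String × List String))) (out : List String) : Prop := out = merge_images_py_alt products
instance (products : List (List (String × List String))) (out : List String) : Decidable (Spec_merge_images_py products out) := by unfold Spec_merge_images_py; infer_instance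

-- ===== CLAIM (what is proved, stated in full; the proofs are below) =====
def Claim_equal_merge_images_py : Prop := ∀ (products : List (List (String × List String))), Dom_merge_images_py products → Pre_merge_images_py products → Spec_merge_images_py products (merge_images_py products)

-- ===== LEMMAS AND PROOFS =====

-- canonical first-occurrence dedup against a list of already-seen URLs
def goDedup (seen : List String) : List String → List String
  | [] => []
  | u :: rest => if seen.contains u then goDedup seen rest else u :: goDedup (seen ++ [u]) rest

-- A's paired (seen, result) state stays diagonal and both components evolve as Set.add folds.
lemma pairfold_inner (l : List String) (s : List String) :
    l.foldl
      (fun (st : PySem.Set String × List String) url =>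
        if st.1.contains url then st
        else (PySem.Set.add st.1 url, st.2 ++ [url]))
      (s, s)
    = (l.foldl PySem.Set.add s, l.foldl PySem.Set.add s) := by
  induction l generalizing s with
  | nil => rfl
  | cons x xs ih =>
    simp only [List.foldl_cons]
    by_cases h : PySem.Set.contains s x = true
    · rw [show PySem.Set.add s x = s from by simp only [PySem.Set.add, h, if_pos], if_pos h, ih]
    · rw [show PySem.Set.add s x = s ++ [x] from by simp only [PySem.Set.add, h, if_neg, Bool.not_eq_true], if_neg h, ih]

lemma pairfold_outer (products : List (List (String × List String))) (s : List String) :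
    products.foldl
      (fun (st : PySem.Set String × List String) p =>
        ((PySem.Dict.mk p).getD "images" []).foldl
          (fun st url =>
            if st.1.contains url then st
            else (PySem.Set.add st.1 url, st.2 ++ [url]))
          st)
      (s, s)
    = (products.foldl (fun s p => ((PySem.Dict.mk p).getD "images" []).foldl PySem.Set.add s) s,
       products.foldl (fun s p => ((PySem.Dict.mk p).getD "images" []).foldl PySem.Set.add s) s) := by
  induction products generalizing s with
  | nil => rfl
  | cons p ps ih =>
    simp only [List.foldl_cons, pairfold_inner, ih]

-- A's seen-set fold is goDedup with the seen list as accumulator.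
lemma foldl_add_eq_goDedup (l : List String) (s : List String) :
    l.foldl PySem.Set.add s = s ++ goDedup s l := by
  induction l generalizing s with
  | nil => simp [goDedup]
  | cons x xs ih =>
    simp only [List.foldl_cons, goDedup, PySem.Set.add]
    by_cases h : PySem.Set.contains s x = true
    · rw [if_pos h, show (s.contains x) = true from h, if_pos rfl, ih]
    · rw [if_neg h, show (s.contains x) = false from by
          simpa [Bool.not_eq_true] using h]
      simp only [Bool.false_eq_true, if_false, ih (s ++ [x]), List.append_assoc,
        List.singleton_append]

-- goDedup only depends on which URLs the seen list contains.
lemma goDedup_congr (l : List String) (p q : List String)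
    (h : ∀ a, p.contains a = q.contains a) : goDedup p l = goDedup q l := by
  induction l generalizing p q with
  | nil => rfl
  | cons u rest ih =>
    simp only [goDedup, h u]
    by_cases hq : q.contains u = true
    · rw [if_pos hq, if_pos hq]; exact ih p q h
    · rw [if_neg hq, if_neg hq]
      refine congrArg (u :: ·) (ih (p ++ [u]) (q ++ [u]) (fun a => ?_))
      have hh : decide (a ∈ p) = decide (a ∈ q) := by simpa using h a
      simp [hh]

-- B's flattening fold is flatMap.
lemma foldl_append_eq_flatMap (products : List (List (String × List String)))
    (acc : List String) :
    products.foldl (fun acc p => acc ++ (PySem.Dict.mk p).getD "images" []) acc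
      = acc ++ products.flatMap (fun p => (PySem.Dict.mk p).getD "images" []) := by
  induction products generalizing acc with
  | nil => simp
  | cons p ps ih => simp [ih, List.flatMap_cons]

-- index into a concatenation whose prefix misses v
lemma index?_append_of_not_mem (pre t : List String) (v : String) (h : v ∉ pre) :
    PySem.List.index? (pre ++ t) v
      = (PySem.List.index? t v).map (fun k => k + pre.length) := by
  induction pre with
  | nil =>
    simp only [List.nil_append, List.length_nil]
    cases PySem.List.index? t v <;> simp
  | cons x xs ih =>
    have hx : x ≠ v := fun hxv => h (hxv ▸ List.mem_cons_self)
    rw [List.cons_append, PySem.List.index?_cons_of_ne _ hx,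
      ih (fun hv => h (List.mem_cons_of_mem _ hv))]
    cases PySem.List.index? t v with
    | none => rfl
    | some k => simp only [Option.map_some, List.length_cons, Option.some.injEq]; omega

-- B's index-based first-occurrence filter over the flat list is goDedup.
lemma filter_index_eq_goDedup (rest q : List String) :
    ((PySem.List.enumerate rest (q.length : Int)).filter
        (fun iu => PySem.List.index? (q ++ rest) iu.2 == some iu.1.toNat)).map
      (fun iu => iu.2)
    = goDedup q rest := by
  induction rest generalizing q with
  | nil => rfl
  | cons u rest' ih =>
    rw [PySem.List.enumerate_cons]
    have hlen : ((q.length : Int) + 1) = (((q ++ [u]).length : Nat) : Int) := by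
      simp
    have hlist : q ++ u :: rest' = (q ++ [u]) ++ rest' := by simp
    by_cases hq : u ∈ q
    · -- already seen: first occurrence is inside q, strictly before position q.length
      have hcontains : q.contains u = true := by simpa using hq
      obtain ⟨k, hk⟩ : ∃ k, PySem.List.index? q u = some k := by
        have := (PySem.List.index?_isSome_iff (xs := q) (v := u)).mpr hq
        exact Option.isSome_iff_exists.mp this
      obtain ⟨hklt, -, -⟩ := PySem.List.getElem_of_index?_eq_some hk
      have hcond : (PySem.List.index? (q ++ u :: rest') u
          == some ((q.length : Int)).toNat) = false := by
        rw [PySem.List.index?_append_of_mem _ hq, hk]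
        simp only [Int.toNat_natCast]
        simp only [beq_eq_false_iff_ne, ne_eq, Option.some.injEq]
        omega
      rw [List.filter_cons, if_neg (by rw [hcond]; simp)]
      rw [hlen, hlist, ih (q ++ [u])]
      rw [show goDedup q (u :: rest') = goDedup q rest' from by
        simp only [goDedup]; rw [if_pos hcontains]]
      refine goDedup_congr rest' (q ++ [u]) q (fun a => ?_)
      by_cases ha : a = u
      · subst ha
        simp [hq]
      · simp [ha]
    · -- fresh: first occurrence is exactly at position q.length
      have hcontains : q.contains u = false := by simpa using hq
      have hcond : (PySem.List.index? (q ++ u :: rest') u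
          == some ((q.length : Int)).toNat) = true := by
        rw [index?_append_of_not_mem q (u :: rest') u hq, PySem.List.index?_cons_self]
        simp
      rw [List.filter_cons, if_pos hcond, List.map_cons]
      rw [hlen, hlist, ih (q ++ [u])]
      simp only [goDedup]
      rw [if_neg (by rw [hcontains]; simp)]

-- ===== VERDICT (by name: the statement is the Claim_ definition above) =====
theorem merge_images_py_spec : Claim_equal_merge_images_py := by
  intro products _ _
  unfold Spec_merge_images_py merge_images_py merge_images_py_alt
  rw [show (PySem.Set.empty : PySem.Set String) = ([] : List String) from rfl]
  rw [pairfold_outer]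
  rw [← List.foldl_flatMap]
  rw [foldl_add_eq_goDedup, foldl_append_eq_flatMap]
  simp only [List.nil_append]
  rw [show (0 : Int) = (([] : List String).length : Int) from rfl,
    ← filter_index_eq_goDedup (products.flatMap (fun p => (PySem.Dict.mk p).getD "images" [])) []]
  rfl
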